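-- pv_equiv track=rewrite | github.com/miguelamica/informatica-gral | practica 6 act 10.py | atributoSimple
-- ===== SOURCE A (Python) =====
-- def atributoSimple(lst):
--     i=0
--     cont=0
--     while i<len(lst)-2:
--         if lst[i]==lst[i+1] and lst[i+1]==lst[i+2]:
--             cont=cont+1
--             i+=3
--         else:
--             i+=1
--     if cont==0:
--         rta="NADA"
--     elif cont==1:
--         rta="UN TRIPLE"
--     elif cont==2:
--         rta="dos triples"
--     elif cont>=3:
--         rta="+ triples"
--     return rta
-- ===== SOURCE B (Python) =====
-- def atributoSimple(lst):
--     # run-length decomposition: cont = sum of (run length // 3) over maximal runs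
--     runs = []
--     for x in lst:
--         if runs and runs[-1][0] == x:
--             runs[-1][1] += 1
--         else:
--             runs.append([x, 1])
--     cont = sum(r // 3 for _, r in runs)
--     if cont == 0:
--         return "NADA"
--     elif cont == 1:
--         return "UN TRIPLE"
--     elif cont == 2:
--         return "dos triples"
--     else:
--         return "+ triples"
-- ===== Notes on version B (the rewrite author's own statement) =====
-- stated objective: idiomatic
-- what changed: Replaced the index-stepping greedy skip-3 scan with a run-length decomposition (one pass building maximal runs, then cont = sum of run_length // 3) feeding the same classification.
import Mathlib
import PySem

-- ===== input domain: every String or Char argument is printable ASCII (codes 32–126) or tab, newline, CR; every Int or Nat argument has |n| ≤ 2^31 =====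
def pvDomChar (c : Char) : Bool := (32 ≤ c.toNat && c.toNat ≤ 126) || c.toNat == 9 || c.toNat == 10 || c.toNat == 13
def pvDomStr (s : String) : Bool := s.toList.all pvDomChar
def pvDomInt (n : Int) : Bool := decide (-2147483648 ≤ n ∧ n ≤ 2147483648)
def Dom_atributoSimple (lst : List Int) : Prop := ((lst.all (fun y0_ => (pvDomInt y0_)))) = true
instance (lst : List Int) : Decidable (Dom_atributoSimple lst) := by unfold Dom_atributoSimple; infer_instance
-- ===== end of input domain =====

-- B re-implements A's greedy skip-3 triple count as a run-length decomposition (cont = Σ run//3); idiomatic, same cost.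

-- ===== PORT A =====
-- the while loop: i steps by 3 on a matched triple, else by 1; cont counts matches
def atributoSimpleLoop (lst : List Int) (i cont : Nat) : Nat :=
  if h : i + 2 < lst.length then
    if lst.getD i 0 = lst.getD (i+1) 0 ∧ lst.getD (i+1) 0 = lst.getD (i+2) 0 then
      atributoSimpleLoop lst (i+3) (cont+1)
    else
      atributoSimpleLoop lst (i+1) cont
  else cont
termination_by lst.length - i
decreasing_by all_goals omega

def atributoSimple (lst : List Int) : String :=
  let cont := atributoSimpleLoop lst 0 0
  if cont = 0 then "NADA"
  else if cont = 1 then "UN TRIPLE"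
  else if cont = 2 then "dos triples"
  else "+ triples"

-- ===== PORT B =====
-- runs[-1] update / append of Source B
def pushRun : List (Int × Nat) → Int → List (Int × Nat)
  | [], x => [(x, 1)]
  | [(y, c)], x => if y = x then [(y, c + 1)] else [(y, c), (x, 1)]
  | p :: q :: rs, x => p :: pushRun (q :: rs) x

def atributoSimple_alt (lst : List Int) : String :=
  let runs : List (Int × Nat) := List.foldl pushRun [] lst
  let cont : Nat := (runs.map (fun p => p.2 / 3)).sum
  if cont = 0 then "NADA"
  else if cont = 1 then "UN TRIPLE"
  else if cont = 2 then "dos triples"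
  else "+ triples"

-- ===== PRECONDITION & SPEC =====
def Spec_atributoSimple (lst : List Int) (out : String) : Prop := out = atributoSimple_alt lst
instance (lst : List Int) (out : String) : Decidable (Spec_atributoSimple lst out) := by unfold Spec_atributoSimple; infer_instance

-- ===== CLAIM (what is proved, stated in full; the proofs are below) =====
def Claim_equal_atributoSimple : Prop := ∀ (lst : List Int), Dom_atributoSimple lst → Spec_atributoSimple lst (atributoSimple lst)

-- ===== LEMMAS AND PROOFS =====

-- structural version of A's greedy count
def gA : List Int → Nat
  | a :: b :: c :: t => if a = b ∧ b = c then gA t + 1 else gA (b :: c :: t)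
  | _ => 0
termination_by l => l.length
decreasing_by all_goals (simp; try omega)

-- B's count
def contB (lst : List Int) : Nat := ((List.foldl pushRun [] lst).map (fun p => p.2 / 3)).sum

lemma gA_nil : gA [] = 0 := by rw [gA]; intro a b c t h; simp at h
lemma gA_one (a : Int) : gA [a] = 0 := by rw [gA]; intro a b c t h; simp at h
lemma gA_two (a b : Int) : gA [a, b] = 0 := by rw [gA]; intro a b c t h; simp at h

lemma gA_short (l : List Int) (h : l.length < 3) : gA l = 0 := by
  match l with
  | [] => exact gA_nil
  | [a] => exact gA_one a
  | [a, b] => exact gA_two a b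
  | _ :: _ :: _ :: _ => exfalso; simp at h; omega

lemma loop_eq (lst : List Int) : ∀ (n i cont : Nat), lst.length - i ≤ n →
    atributoSimpleLoop lst i cont = cont + gA (lst.drop i) := by
  intro n
  induction n with
  | zero =>
    intro i cont hn
    rw [atributoSimpleLoop, dif_neg (by omega), gA_short _ (by simp; omega)]
    omega
  | succ n ih =>
    intro i cont hn
    rw [atributoSimpleLoop]
    by_cases h : i + 2 < lst.length
    · have hlen : (lst.drop i).length = lst.length - i := by simp
      obtain ⟨a, b, c, t, hdrop⟩ : ∃ a b c t, lst.drop i = a :: b :: c :: t := by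
        match hm : lst.drop i with
        | [] => exfalso; rw [hm] at hlen; simp at hlen; omega
        | [a] => exfalso; rw [hm] at hlen; simp at hlen; omega
        | [a, b] => exfalso; rw [hm] at hlen; simp at hlen; omega
        | a :: b :: c :: t => exact ⟨a, b, c, t, rfl⟩
      have hg0 : lst.getD i 0 = a := by
        have h' : (List.drop i lst)[0]? = lst[i + 0]? := List.getElem?_drop
        rw [hdrop] at h'
        simp at h'
        simp [List.getD_eq_getElem?_getD, ← h']
      have hg1 : lst.getD (i+1) 0 = b := by
        have h' : (List.drop i lst)[1]? = lst[i + 1]? := List.getElem?_drop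
        rw [hdrop] at h'
        simp at h'
        simp [List.getD_eq_getElem?_getD, ← h']
      have hg2 : lst.getD (i+2) 0 = c := by
        have h' : (List.drop i lst)[2]? = lst[i + 2]? := List.getElem?_drop
        rw [hdrop] at h'
        simp at h'
        simp [List.getD_eq_getElem?_getD, ← h']
      have hd1 : lst.drop (i+1) = b :: c :: t := by
        have h1 : lst.drop (i+1) = (lst.drop i).drop 1 := by rw [List.drop_drop]
        rw [h1, hdrop]; rfl
      have hd3 : lst.drop (i+3) = t := by
        have h3 : lst.drop (i+3) = (lst.drop i).drop 3 := by rw [List.drop_drop]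
        rw [h3, hdrop]; rfl
      rw [dif_pos h, hg0, hg1, hg2, hdrop]
      by_cases hc : a = b ∧ b = c
      · rw [if_pos hc, ih (i+3) (cont+1) (by omega), hd3, gA, if_pos hc]
        omega
      · rw [if_neg hc, ih (i+1) cont (by omega), hd1, gA, if_neg hc]
    · rw [dif_neg h, gA_short _ (by simp; omega)]
      omega

-- within-a-run part of A's greedy count: over a maximal run of length m it yields m/3
lemma gA_replicate (m : Nat) (x : Int) (rest : List Int) (hr : rest.head? ≠ some x) :
    gA (List.replicate m x ++ rest) = m / 3 + gA rest := by
  induction m using Nat.strong_induction_on with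
  | _ m ih =>
    rcases m with _ | _ | _ | k
    · simp
    · match rest, hr with
      | [], _ => simp [gA_nil, gA_one]
      | [y], _ => simp [gA_one, gA_two]
      | y :: z :: t, hr =>
        have hxy : x ≠ y := by simp at hr; exact fun h => hr h.symm
        show gA (x :: y :: z :: t) = 1 / 3 + gA (y :: z :: t)
        rw [gA, if_neg (by tauto)]
        simp
    · match rest, hr with
      | [], _ => simp [gA_nil, gA_two]
      | y :: t, hr =>
        have hxy : x ≠ y := by simp at hr; exact fun h => hr h.symm
        show gA (x :: x :: y :: t) = 2 / 3 + gA (y :: t)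
        rw [gA, if_neg (by tauto)]
        have h1 := ih 1 (by omega)
        simp only [List.replicate, List.singleton_append] at h1
        rw [h1]
    · have hrep : List.replicate (k+3) x ++ rest = x :: x :: x :: (List.replicate k x ++ rest) := by
        simp [List.replicate_succ]
      rw [hrep, gA, if_pos ⟨rfl, rfl⟩, ih k (by omega)]
      omega

lemma pushRun_ne_nil (r : List (Int × Nat)) (x : Int) : pushRun r x ≠ [] := by
  match r with
  | [] => simp [pushRun]
  | [(y, c)] => by_cases h : y = x <;> simp [pushRun, h]
  | p :: q :: rs => simp [pushRun]

lemma foldl_keep (l : List Int) : ∀ (p : Int × Nat) (rs : List (Int × Nat)), rs ≠ [] →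
    List.foldl pushRun (p :: rs) l = p :: List.foldl pushRun rs l := by
  induction l with
  | nil => intro p rs _; rfl
  | cons a l ih =>
    intro p rs hrs
    match rs with
    | q :: rs' =>
      show List.foldl pushRun (pushRun (p :: q :: rs') a) l = _
      rw [pushRun]
      exact ih p _ (pushRun_ne_nil _ _)

lemma foldl_run (m : Nat) (x : Int) : ∀ c, List.foldl pushRun [(x, c)] (List.replicate m x) = [(x, c + m)] := by
  induction m with
  | zero => intro c; rfl
  | succ k ih =>
    intro c
    rw [List.replicate_succ]
    show List.foldl pushRun (pushRun [(x, c)] x) (List.replicate k x) = _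
    rw [show pushRun [(x, c)] x = [(x, c + 1)] by simp [pushRun]]
    rw [ih]
    have hc : c + 1 + k = c + (k + 1) := by omega
    rw [hc]

lemma runs_replicate_append (m : Nat) (hm : 1 ≤ m) (x : Int) (rest : List Int) (hr : rest.head? ≠ some x) :
    List.foldl pushRun [] (List.replicate m x ++ rest) = (x, m) :: List.foldl pushRun [] rest := by
  rw [List.foldl_append]
  have h1 : List.foldl pushRun [] (List.replicate m x) = [(x, m)] := by
    obtain ⟨k, rfl⟩ : ∃ k, m = k + 1 := ⟨m - 1, by omega⟩
    rw [List.replicate_succ]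
    show List.foldl pushRun (pushRun [] x) (List.replicate k x) = _
    rw [show pushRun [] x = [(x, 1)] from rfl, foldl_run]
    have hk : 1 + k = k + 1 := by omega
    rw [hk]
  rw [h1]
  match rest with
  | [] => rfl
  | y :: t =>
    have hxy : x ≠ y := by simp at hr; exact fun h => hr h.symm
    show List.foldl pushRun (pushRun [(x, m)] y) t = (x, m) :: List.foldl pushRun (pushRun [] y) t
    rw [show pushRun [(x, m)] y = [(x, m), (y, 1)] by simp [pushRun, hxy],
        show pushRun [] y = [(y, 1)] from rfl]
    exact foldl_keep t (x, m) [(y, 1)] (by simp)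

lemma head_dropWhile {p : Int → Bool} : ∀ (l : List Int) (a : Int), (l.dropWhile p).head? = some a → p a = false := by
  intro l
  induction l with
  | nil => intro a h; simp [List.dropWhile] at h
  | cons x t ih =>
    intro a h
    rw [List.dropWhile_cons] at h
    by_cases hp : p x
    · rw [if_pos hp] at h; exact ih a h
    · rw [if_neg hp] at h; simp at h; subst h; simpa using hp

lemma gA_eq_contB : ∀ (n : Nat) (l : List Int), l.length ≤ n → gA l = contB l := by
  intro n
  induction n with
  | zero =>
    intro l hl
    have h0 : l = [] := by cases l <;> simp_all
    subst h0
    simp [gA_nil, contB]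
  | succ n ih =>
    intro l hl
    match l with
    | [] => simp [gA_nil, contB]
    | x :: t =>
      set p : Int → Bool := fun a => a == x with hp
      set m : Nat := ((x :: t).takeWhile p).length with hm
      set rest : List Int := (x :: t).dropWhile p with hrest
      have hdecomp : (x :: t) = List.replicate m x ++ rest := by
        conv_lhs => rw [← List.takeWhile_append_dropWhile (p := p) (l := x :: t)]
        congr 1
        rw [List.eq_replicate_iff]
        refine ⟨rfl, fun b hb => ?_⟩
        have := List.mem_takeWhile_imp hb
        simpa [hp] using this
      have hm1 : 1 ≤ m := by
        rw [hm, List.takeWhile_cons, if_pos (by simp [hp])]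
        simp
      have hhead : rest.head? ≠ some x := by
        intro hcontra
        have := head_dropWhile (p := p) (x :: t) x hcontra
        simp [hp] at this
      have hlen : rest.length ≤ n := by
        have : m + rest.length = (x :: t).length := by
          rw [hdecomp]; simp
        simp at this hl ⊢
        omega
      rw [hdecomp, gA_replicate m x rest hhead, ih rest hlen]
      unfold contB
      rw [runs_replicate_append m hm1 x rest hhead]
      simp

lemma counts_eq (lst : List Int) : atributoSimpleLoop lst 0 0 = contB lst := by
  rw [loop_eq lst lst.length 0 0 (by omega)]
  simpa using gA_eq_contB lst.length lst le_rfl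

-- ===== VERDICT (by name: the statement is the Claim_ definition above) =====
theorem atributoSimple_spec : Claim_equal_atributoSimple := by
  intro lst _
  unfold Spec_atributoSimple atributoSimple atributoSimple_alt
  rw [counts_eq]
  rfl
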